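-- pv_equiv track=rewrite | github.com/dudamarlena/pyc_source | pycfiles/satella-2.7.24.linux-x86_64.tar/sequences.cpython-36.py | add_next
-- ===== SOURCE A (Python) =====
-- import typing as tp
--
-- T = tp.TypeVar('T')
--
-- def add_next(lst: tp.Iterable[T], wrap_over: bool=False, skip_last: bool=False) -> tp.Iterator[tp.Tuple[(T, tp.Optional[T])]]:
--     """
--     Yields a 2-tuple of given iterable, presenting the next element as second element of the tuple.
--
--     The last element will be the last element alongside with a None, if wrap_over is False, or the
--     first element if wrap_over was True
--
--     Example:
--
--     >>> list(add_next([1, 2, 3, 4, 5])) == [(1, 2), (2, 3), (3, 4), (4, 5), (5, None)]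
--     >>> list(add_next([1, 2, 3, 4, 5], True)) == [(1, 2), (2, 3), (3, 4), (4, 5), (5, 1)]
--
--     :param lst: iterable to iterate over
--     :param wrap_over: whether to attach the first element to the pair of the last element instead
--         of None
--     :param skip_last: if this is True, then last element, alongside with a None, won't be output
--     """
--     iterator = iter(lst)
--     try:
--         first_val = prev_val = next(iterator)
--     except StopIteration:
--         return
--     else:
--         for val in iterator:
--             yield (
--              prev_val, val)
--             prev_val = val
--
--         if wrap_over:
--             yield (
--              prev_val, first_val)
--         elif not skip_last:
--             yield (
--              prev_val, None)
-- ===== SOURCE B (Python) =====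
-- def add_next(lst, wrap_over=False, skip_last=False):
--     items = list(lst)
--     if not items:
--         return
--     yield from zip(items, items[1:])
--     if wrap_over:
--         yield (items[-1], items[0])
--     elif not skip_last:
--         yield (items[-1], None)
-- ===== Notes on version B (the rewrite author's own statement) =====
-- stated objective: alternative
-- what changed: Replaces the streaming prev-pointer generator with a materialized list: consecutive pairs come from zipping the list with its own tail, and the wrap/last pair is read by indexing the last and first elements.
import Mathlib
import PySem

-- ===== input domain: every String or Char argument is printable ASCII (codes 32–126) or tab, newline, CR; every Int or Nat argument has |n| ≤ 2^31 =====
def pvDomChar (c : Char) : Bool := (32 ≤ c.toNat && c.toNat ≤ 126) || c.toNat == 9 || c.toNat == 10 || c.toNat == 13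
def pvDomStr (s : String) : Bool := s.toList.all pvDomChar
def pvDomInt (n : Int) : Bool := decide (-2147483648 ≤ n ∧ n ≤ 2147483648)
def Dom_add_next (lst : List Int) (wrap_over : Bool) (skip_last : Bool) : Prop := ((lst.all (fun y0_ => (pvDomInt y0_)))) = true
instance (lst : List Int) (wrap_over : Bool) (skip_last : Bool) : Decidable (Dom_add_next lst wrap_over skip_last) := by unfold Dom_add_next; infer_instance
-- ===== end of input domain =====

-- ===== PORT A =====
-- loop 'for val in iterator: yield (prev_val, val); prev_val = val' then the tail, as structural recursion over the same state
def addNextGo (first : Int) (wrap_over : Bool) (skip_last : Bool) (prev : Int) : List Int → List (Int × Option Int)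
  | [] =>
    if wrap_over then [(prev, some first)]
    else if !skip_last then [(prev, none)]
    else []
  | v :: vs => (prev, some v) :: addNextGo first wrap_over skip_last v vs

def add_next (lst : List Int) (wrap_over : Bool) (skip_last : Bool) : List (Int × Option Int) :=
  match lst with
  | [] => []  -- StopIteration on the first next(): return immediately
  | first :: rest => addNextGo first wrap_over skip_last first rest

-- ===== PORT B =====
-- zip(items, items[1:]) ++ the wrap/last tail read by indexing
def add_next_alt (lst : List Int) (wrap_over : Bool) (skip_last : Bool) : List (Int × Option Int) :=
  match lst with
  | [] => []
  | _ =>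
    List.zipWith (fun a b => (a, some b)) lst lst.tail ++
      (if wrap_over then [(lst.getLast!, some lst.head!)]
       else if !skip_last then [(lst.getLast!, none)]
       else [])

-- ===== PRECONDITION & SPEC =====
def Spec_add_next (lst : List Int) (wrap_over : Bool) (skip_last : Bool) (out : List (Int × Option Int)) : Prop := out = add_next_alt lst wrap_over skip_last
instance (lst : List Int) (wrap_over : Bool) (skip_last : Bool) (out : List (Int × Option Int)) : Decidable (Spec_add_next lst wrap_over skip_last out) := by unfold Spec_add_next; infer_instance

-- ===== CLAIM (what is proved, stated in full; the proofs are below) =====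
def Claim_equal_add_next : Prop := ∀ (lst : List Int) (wrap_over : Bool) (skip_last : Bool), Dom_add_next lst wrap_over skip_last → Spec_add_next lst wrap_over skip_last (add_next lst wrap_over skip_last)

-- ===== LEMMAS AND PROOFS =====

-- ===== VERDICT (by name: the statement is the Claim_ definition above) =====
theorem addNextGo_eq (first : Int) (w s : Bool) :
    ∀ (rest : List Int) (prev : Int),
      addNextGo first w s prev rest =
        List.zipWith (fun a b => (a, some b)) (prev :: rest) rest ++
          (if w then [((prev :: rest).getLast!, some first)]
           else if !s then [((prev :: rest).getLast!, none)]
           else []) := by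
  intro rest
  induction rest with
  | nil => intro prev; simp [addNextGo, List.getLast!]
  | cons v vs ih =>
    intro prev
    simp only [addNextGo, List.zipWith, ih v, List.cons_append]
    have : (prev :: v :: vs).getLast! = (v :: vs).getLast! := by
      simp [List.getLast!, List.getLast]
    rw [this]

theorem add_next_spec : Claim_equal_add_next := by
  intro lst w s _
  unfold Spec_add_next
  cases lst with
  | nil => rfl
  | cons f rest =>
    simp only [add_next, add_next_alt, List.tail_cons, addNextGo_eq, List.head!]
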